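-- pv_equiv track=rewrite | github.com/NorskRegnesentral/skweak | skweak/utils.py | at_least_nb_occurrences
-- ===== SOURCE A (Python) =====
-- from typing import List, Dict, Tuple, Optional, TypeVar, Iterable
--
-- def at_least_nb_occurrences(tokens: Tuple[str, ...], all_tokens: List[str], min_threshold):
--     """Returns true if the number of occurences of the sequence of tokens in the
--     full list all_tokens is at least min_threshold, and false otherwise"""
--
--     if len(tokens) == 1:
--         return all_tokens.count(tokens[0]) >= min_threshold
--
--     nb_occurrences = 0
--     for i in range(len(all_tokens)):
--         for k in range(len(tokens)):
--             if (i+k) >= len(all_tokens) or all_tokens[i+k] != tokens[k]: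
--                 break
--         else:
--             nb_occurrences += 1
--             if nb_occurrences >= min_threshold:
--                 return True
--     return False
-- ===== SOURCE B (Python) =====
-- def at_least_nb_occurrences(tokens, all_tokens, min_threshold):
--     """Returns true if the number of occurences of the sequence of tokens in the
--     full list all_tokens is at least min_threshold, and false otherwise"""
--
--     if len(tokens) == 1:
--         return all_tokens.count(tokens[0]) >= min_threshold
--
--     n = len(all_tokens)
--     # ok[i]: the pattern suffix processed so far matches all_tokens starting at i
--     ok = [True] * (n + 1)
--     for tok in reversed(tokens):
--         ok = [i + 1 <= n and all_tokens[i] == tok and ok[i + 1]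
--               for i in range(n + 1)]
--     return sum(ok[:n]) >= min_threshold
-- ===== Notes on version B (the rewrite author's own statement) =====
-- stated objective: alternative
-- what changed: Replaces A's early-returning double loop over start positions with a right-to-left dynamic-programming pass: a boolean table ok[i] ('pattern suffix matches at i') is refined once per pattern token, and the final match count is compared against min_threshold.
-- intended difference: On multi-token (len != 1) patterns that do not occur in all_tokens with min_threshold <= 0, A returns False while B returns True; zero occurrences is 'at least' a non-positive threshold, and A's own single-token branch already returns True in that situation. — e.g. on at_least_nb_occurrences(["a", "b"], [], 0): A returns false, B returns true
import Mathlib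
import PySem

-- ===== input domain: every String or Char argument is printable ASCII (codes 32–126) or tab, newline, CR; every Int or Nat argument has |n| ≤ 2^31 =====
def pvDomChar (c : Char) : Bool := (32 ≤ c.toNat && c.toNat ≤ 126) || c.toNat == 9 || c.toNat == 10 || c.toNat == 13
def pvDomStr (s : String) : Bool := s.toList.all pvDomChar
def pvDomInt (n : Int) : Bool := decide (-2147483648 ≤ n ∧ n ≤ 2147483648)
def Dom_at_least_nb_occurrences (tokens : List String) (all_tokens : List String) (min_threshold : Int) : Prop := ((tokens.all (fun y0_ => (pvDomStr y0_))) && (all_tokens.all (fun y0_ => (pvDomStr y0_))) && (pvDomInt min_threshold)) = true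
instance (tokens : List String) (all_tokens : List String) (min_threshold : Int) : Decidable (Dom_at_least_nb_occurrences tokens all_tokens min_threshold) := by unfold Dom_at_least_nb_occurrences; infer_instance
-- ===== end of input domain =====

-- B replaces A's early-returning nested scan with a right-to-left DP table of suffix matches
-- compared against the threshold (objective: alternative); on non-occurring multi-token patterns
-- with a non-positive threshold B returns True where A returns False (stated as D_ below).


-- ===== PORT A =====
-- inner 'for k in range(len(tokens)): … break / else' loop: returns true iff no break
def pvMatchA (all_tokens tokens : List String) (i : Int) : List Int → Bool
  | [] => true
  | k :: ks =>
    if decide (((all_tokens.length : Int)) ≤ i + k) ||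
       (PySem.List.pyGet? all_tokens (i + k) != PySem.List.pyGet? tokens k) then false
    else pvMatchA all_tokens tokens i ks

-- outer 'for i in range(len(all_tokens))' loop carrying nb_occurrences, with the early return
def pvLoopA (all_tokens tokens : List String) (thr : Int) : List Int → Int → Bool
  | [], _ => false
  | i :: is, nb =>
    if pvMatchA all_tokens tokens i (PySem.List.pyRange 0 (tokens.length : Int) 1) then
      if thr ≤ nb + 1 then true
      else pvLoopA all_tokens tokens thr is (nb + 1)
    else pvLoopA all_tokens tokens thr is nb

def at_least_nb_occurrences (tokens : List String) (all_tokens : List String) (min_threshold : Int) : Bool :=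
  if tokens.length == 1 then
    -- tokens[0] is in range because len(tokens) == 1
    decide (min_threshold ≤ ((PySem.List.count all_tokens ((PySem.List.pyGet? tokens 0).getD "") : Nat) : Int))
  else
    pvLoopA all_tokens tokens min_threshold (PySem.List.pyRange 0 (all_tokens.length : Int) 1) 0

-- ===== PORT B =====
-- one refinement pass: ok[i] := i+1 <= n and all_tokens[i] == tok and ok[i+1]  (indices kept in range by the guard)
def pvStepB (all_tokens : List String) (n : Nat) (ok : List Bool) (tok : String) : List Bool :=
  (List.range (n + 1)).map (fun i => decide (i + 1 ≤ n) && (all_tokens.getD i "" == tok) && ok.getD (i + 1) false)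

def at_least_nb_occurrences_alt (tokens : List String) (all_tokens : List String) (min_threshold : Int) : Bool :=
  if tokens.length == 1 then
    decide (min_threshold ≤ ((PySem.List.count all_tokens ((PySem.List.pyGet? tokens 0).getD "") : Nat) : Int))
  else
    decide (min_threshold ≤
      ((((tokens.reverse.foldl (pvStepB all_tokens all_tokens.length)
            (List.replicate (all_tokens.length + 1) true)).take all_tokens.length).count true : Nat) : Int))

-- ===== PRECONDITION & SPEC =====
-- On multi-token (len ≠ 1) patterns that do not occur in all_tokens with min_threshold ≤ 0,
-- A returns False while B returns True; zero occurrences is 'at least' a non-positive threshold,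
-- and A's own single-token branch already returns True in that situation.
def D_at_least_nb_occurrences (tokens : List String) (all_tokens : List String) (min_threshold : Int) : Prop :=
  tokens.length ≠ 1 ∧ min_threshold ≤ 0 ∧
  ∀ i, i < all_tokens.length → ¬ (tokens <+: all_tokens.drop i)
instance (tokens : List String) (all_tokens : List String) (min_threshold : Int) : Decidable (D_at_least_nb_occurrences tokens all_tokens min_threshold) := by unfold D_at_least_nb_occurrences; infer_instance

def Spec_at_least_nb_occurrences (tokens : List String) (all_tokens : List String) (min_threshold : Int) (out : Bool) : Prop := ¬ D_at_least_nb_occurrences tokens all_tokens min_threshold → out = at_least_nb_occurrences_alt tokens all_tokens min_threshold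
instance (tokens : List String) (all_tokens : List String) (min_threshold : Int) (out : Bool) : Decidable (Spec_at_least_nb_occurrences tokens all_tokens min_threshold out) := by unfold Spec_at_least_nb_occurrences; infer_instance

def pvDiffWitness_at_least_nb_occurrences : List String × List String × Int := (["a", "b"], [], 0)
def pvDiffWitnessOut_at_least_nb_occurrences : Bool × Bool := (false, true)

-- ===== CLAIM (what is proved, stated in full; the proofs are below) =====
def Claim_unchanged_at_least_nb_occurrences : Prop := ∀ (tokens : List String) (all_tokens : List String) (min_threshold : Int), Dom_at_least_nb_occurrences tokens all_tokens min_threshold → Spec_at_least_nb_occurrences tokens all_tokens min_threshold (at_least_nb_occurrences tokens all_tokens min_threshold)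
def Claim_changed_at_least_nb_occurrences : Prop := Dom_at_least_nb_occurrences (pvDiffWitness_at_least_nb_occurrences.1) (pvDiffWitness_at_least_nb_occurrences.2.1) (pvDiffWitness_at_least_nb_occurrences.2.2) ∧ D_at_least_nb_occurrences (pvDiffWitness_at_least_nb_occurrences.1) (pvDiffWitness_at_least_nb_occurrences.2.1) (pvDiffWitness_at_least_nb_occurrences.2.2) ∧ at_least_nb_occurrences (pvDiffWitness_at_least_nb_occurrences.1) (pvDiffWitness_at_least_nb_occurrences.2.1) (pvDiffWitness_at_least_nb_occurrences.2.2) = pvDiffWitnessOut_at_least_nb_occurrences.1 ∧ at_least_nb_occurrences_alt (pvDiffWitness_at_least_nb_occurrences.1) (pvDiffWitness_at_least_nb_occurrences.2.1) (pvDiffWitness_at_least_nb_occurrences.2.2) = pvDiffWitnessOut_at_least_nb_occurrences.2 ∧ pvDiffWitnessOut_at_least_nb_occurrences.1 ≠ pvDiffWitnessOut_at_least_nb_occurrences.2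
def Claim_exact_at_least_nb_occurrences : Prop := ∀ (tokens : List String) (all_tokens : List String) (min_threshold : Int), Dom_at_least_nb_occurrences tokens all_tokens min_threshold → D_at_least_nb_occurrences tokens all_tokens min_threshold → at_least_nb_occurrences tokens all_tokens min_threshold ≠ at_least_nb_occurrences_alt tokens all_tokens min_threshold

-- ===== LEMMAS AND PROOFS =====

-- B's fold computes, at every index i ≤ n, whether the processed pattern is a prefix of all_tokens.drop i
theorem pvFoldB_eq (all_tokens : List String) (ts : List String) :
    ts.foldr (fun tok ok => pvStepB all_tokens all_tokens.length ok tok)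
      (List.replicate (all_tokens.length + 1) true)
    = (List.range (all_tokens.length + 1)).map (fun i => decide (ts <+: all_tokens.drop i)) := by
  induction ts with
  | nil =>
    simp
  | cons t ts ih =>
    rw [List.foldr_cons, ih]
    unfold pvStepB
    apply List.map_congr_left
    intro i hi
    have hi' : i < all_tokens.length + 1 := List.mem_range.mp hi
    by_cases h : i < all_tokens.length
    · have hget : ((List.range (all_tokens.length + 1)).map
          (fun i => decide (ts <+: all_tokens.drop i))).getD (i + 1) false
          = decide (ts <+: all_tokens.drop (i + 1)) := by
        simp [List.getD_eq_getElem?_getD, Nat.add_lt_add_right h 1]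
      have hn1 : decide (i + 1 ≤ all_tokens.length) = true := by simp [h]
      have hgd : all_tokens.getD i "" = all_tokens[i] := by
        simp [List.getD_eq_getElem?_getD, h]
      rw [hget, hn1, hgd, Bool.true_and, List.drop_eq_getElem_cons h]
      rcases Decidable.em (all_tokens[i] = t) with he | he
      · rw [he, beq_self_eq_true, Bool.true_and]
        have h2 : (t :: ts <+: t :: all_tokens.drop (i + 1)) ↔
            (ts <+: all_tokens.drop (i + 1)) := by
          rw [List.cons_prefix_cons]; simp
        rw [decide_eq_decide.mpr h2]
      · have h1 : (all_tokens[i] == t) = false := by simp [he]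
        rw [h1, Bool.false_and]
        have h2 : ¬ (t :: ts <+: all_tokens[i] :: all_tokens.drop (i + 1)) := by
          rw [List.cons_prefix_cons]
          rintro ⟨h3, -⟩
          exact he h3.symm
        rw [decide_eq_false h2]
    · have hge : all_tokens.length ≤ i := Nat.le_of_not_lt h
      have hdrop : all_tokens.drop i = [] := List.drop_eq_nil_of_le hge
      simp [hdrop, h, List.prefix_nil]

-- A's inner loop, started at offset k with the rest of the pattern being ts, tests that
-- ts is a prefix of all_tokens.drop (i+k)
theorem pvMatchA_eq (all_tokens tokens : List String) :
    ∀ (ts : List String) (k i : Nat), tokens.drop k = ts →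
    pvMatchA all_tokens tokens (i : Int) (PySem.List.pyRange (k : Int) (tokens.length : Int) 1)
      = decide (ts <+: all_tokens.drop (i + k)) := by
  intro ts
  induction ts with
  | nil =>
    intro k i hk
    have hlen : tokens.length ≤ k := by
      have := congrArg List.length hk
      simp at this; omega
    rw [PySem.List.pyRange_one_eq_nil (by exact_mod_cast hlen)]
    simp [pvMatchA]
  | cons t ts ih =>
    intro k i hk
    have hklen : k < tokens.length := by
      by_contra hc
      rw [List.drop_eq_nil_of_le (Nat.le_of_not_lt hc)] at hk
      exact List.cons_ne_nil t ts hk.symm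
    have hcons := List.drop_eq_getElem_cons hklen (l := tokens)
    rw [hk] at hcons
    have h12 := List.cons.inj hcons
    have htk : tokens[k] = t := h12.1.symm
    have hts : tokens.drop (k + 1) = ts := h12.2.symm
    rw [PySem.List.pyRange_one_cons (by exact_mod_cast hklen)]
    unfold pvMatchA
    have hik : (i : Int) + (k : Int) = ((i + k : Nat) : Int) := by push_cast; ring
    by_cases hn : all_tokens.length ≤ i + k
    · have hdrop : all_tokens.drop (i + k) = [] := List.drop_eq_nil_of_le hn
      have : decide (((all_tokens.length : Int)) ≤ (i : Int) + (k : Int)) = true := by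
        simp; exact_mod_cast hn
      simp only [this, Bool.true_or, if_true]
      simp [hdrop, List.prefix_nil]
    · have hlt : i + k < all_tokens.length := Nat.lt_of_not_le hn
      have hc1 : decide (((all_tokens.length : Int)) ≤ (i : Int) + (k : Int)) = false := by
        simp; exact_mod_cast hlt
      have hg1 : PySem.List.pyGet? all_tokens ((i : Int) + (k : Int)) = some all_tokens[i + k] := by
        rw [hik, PySem.List.pyGet?_natCast]
        exact List.getElem?_eq_getElem hlt
      have hg2 : PySem.List.pyGet? tokens (k : Int) = some t := by
        rw [PySem.List.pyGet?_natCast]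
        rw [List.getElem?_eq_getElem hklen, htk]
      rw [List.drop_eq_getElem_cons hlt]
      simp only [hc1, hg1, hg2, Bool.false_or]
      by_cases he : all_tokens[i + k] = t
      · have hbne : (some all_tokens[i + k] != some t) = false := by simp [he]
        rw [hbne, if_neg (by simp)]
        have hrec := ih (k + 1) i hts
        have hcast : ((k : Int) + 1) = (((k + 1 : Nat)) : Int) := by push_cast; ring
        rw [hcast, hrec]
        have : i + (k + 1) = i + k + 1 := by omega
        rw [this]
        simp [List.cons_prefix_cons, he]
      · have hbne : (some all_tokens[i + k] != some t) = true := by simp [he]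
        rw [hbne, if_pos rfl]
        symm
        rw [decide_eq_false_iff_not, List.cons_prefix_cons]
        rintro ⟨h1, -⟩
        exact he h1.symm

-- A's outer loop with accumulator nb returns true iff the number of matching start
-- positions in the remaining list reaches max (thr - nb) 1
theorem pvLoopA_eq (all_tokens tokens : List String) (thr : Int) :
    ∀ (is : List Int) (nb : Int),
    pvLoopA all_tokens tokens thr is nb
      = decide (max (thr - nb) 1 ≤
          ((is.countP (fun i => pvMatchA all_tokens tokens i
              (PySem.List.pyRange 0 (tokens.length : Int) 1)) : Nat) : Int)) := by
  intro is
  induction is with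
  | nil => intro nb; simp [pvLoopA]
  | cons i is ih =>
    intro nb
    unfold pvLoopA
    by_cases hm : pvMatchA all_tokens tokens i (PySem.List.pyRange 0 (tokens.length : Int) 1) = true
    · rw [if_pos hm]
      rw [List.countP_cons, if_pos hm]
      by_cases ht : thr ≤ nb + 1
      · rw [if_pos ht]
        symm
        rw [decide_eq_true_iff]
        push_cast
        omega
      · rw [if_neg ht, ih (nb + 1)]
        have hkey : ∀ c : Nat, (max (thr - (nb + 1)) 1 ≤ (c : Int))
            ↔ (max (thr - nb) 1 ≤ ((c + 1 : Nat) : Int)) := by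
          intro c; push_cast; omega
        simp only [decide_eq_decide]
        exact hkey _
    · rw [if_neg hm, List.countP_cons, if_neg hm]
      simpa using ih nb

-- the common count: number of start positions i < n where tokens is a prefix of all_tokens.drop i
theorem pvCountA_eq (all_tokens tokens : List String) :
    (PySem.List.pyRange 0 (all_tokens.length : Int) 1).countP
        (fun i => pvMatchA all_tokens tokens i (PySem.List.pyRange 0 (tokens.length : Int) 1))
      = (List.range all_tokens.length).countP (fun i => decide (tokens <+: all_tokens.drop i)) := by
  rw [PySem.List.pyRange_zero_natCast all_tokens.length]
  rw [List.countP_map]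
  apply List.countP_congr
  intro i hi
  have := pvMatchA_eq all_tokens tokens tokens 0 i rfl
  simp only [Function.comp]
  rw [show ((0 : Nat) : Int) = (0 : Int) by norm_num] at this
  rw [this]
  simp

theorem pvCountB_eq (all_tokens tokens : List String) :
    ((tokens.reverse.foldl (pvStepB all_tokens all_tokens.length)
        (List.replicate (all_tokens.length + 1) true)).take all_tokens.length).count true
      = (List.range all_tokens.length).countP (fun i => decide (tokens <+: all_tokens.drop i)) := by
  rw [List.foldl_reverse]
  rw [pvFoldB_eq all_tokens tokens]
  rw [← List.map_take]
  rw [List.take_range]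
  have hmin : min all_tokens.length (all_tokens.length + 1) = all_tokens.length := by omega
  rw [hmin]
  rw [List.count_eq_countP, List.countP_map]
  apply List.countP_congr
  intro i _
  simp [Function.comp]

-- on non-single-token inputs, A = decide (max thr 1 ≤ count) and B = decide (thr ≤ count)
-- for the same count of matching start positions
theorem pvAB_counts (tokens all_tokens : List String) (thr : Int) (h1 : (tokens.length == 1) = false) :
    at_least_nb_occurrences tokens all_tokens thr
      = decide (max thr 1 ≤
          (((List.range all_tokens.length).countP
              (fun i => decide (tokens <+: all_tokens.drop i)) : Nat) : Int))
    ∧ at_least_nb_occurrences_alt tokens all_tokens thr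
      = decide (thr ≤
          (((List.range all_tokens.length).countP
              (fun i => decide (tokens <+: all_tokens.drop i)) : Nat) : Int)) := by
  constructor
  · unfold at_least_nb_occurrences
    rw [if_neg (by simp_all)]
    rw [pvLoopA_eq all_tokens tokens thr _ 0, pvCountA_eq]
    norm_num
  · unfold at_least_nb_occurrences_alt
    rw [if_neg (by simp_all)]
    rw [pvCountB_eq]

-- ===== VERDICT (by name: the statement is the Claim_ definition above) =====
theorem at_least_nb_occurrences_spec : Claim_unchanged_at_least_nb_occurrences := by
  intro tokens all_tokens min_threshold _
  unfold Spec_at_least_nb_occurrences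
  intro hnd
  by_cases h1 : tokens.length == 1
  · unfold at_least_nb_occurrences at_least_nb_occurrences_alt
    rw [if_pos h1, if_pos h1]
  · obtain ⟨ha, hb⟩ := pvAB_counts tokens all_tokens min_threshold (by simp_all)
    rw [ha, hb]
    by_cases ht : 1 ≤ min_threshold
    · rw [max_eq_left ht]
    · -- min_threshold ≤ 0; ¬D_ gives some matching start position, so the count is ≥ 1
      have hcnt : 1 ≤ (List.range all_tokens.length).countP
          (fun i => decide (tokens <+: all_tokens.drop i)) := by
        by_contra hc
        have hzero : (List.range all_tokens.length).countP
            (fun i => decide (tokens <+: all_tokens.drop i)) = 0 := by omega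
        rw [List.countP_eq_zero] at hzero
        exact hnd ⟨by simp_all, by omega,
          fun i hi hp => by
            have := hzero i (List.mem_range.mpr hi)
            simp [hp] at this⟩
      simp only [decide_eq_decide]
      omega

theorem at_least_nb_occurrences_changed : Claim_changed_at_least_nb_occurrences := by
  unfold Claim_changed_at_least_nb_occurrences; decide

theorem at_least_nb_occurrences_tight : Claim_exact_at_least_nb_occurrences := by
  intro tokens all_tokens min_threshold _ hd
  obtain ⟨hl, ht, hno⟩ := hd
  obtain ⟨ha, hb⟩ := pvAB_counts tokens all_tokens min_threshold (by simp_all)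
  have hzero : (List.range all_tokens.length).countP
      (fun i => decide (tokens <+: all_tokens.drop i)) = 0 := by
    rw [List.countP_eq_zero]
    intro i hi
    simp [hno i (List.mem_range.mp hi)]
  rw [ha, hb, hzero]
  simp
  omega
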